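-- pv_equiv track=rewrite | github.com/pedrorodrigwez/letter_match | function.py | letter_match
-- ===== SOURCE A (Python) =====
-- def letter_match(strArr):
--     #la palabra buscada
--     my_word = strArr[0]
--     #lista de las letras que conforman la palabra buscada.
--     letters_of_word = [x for x in my_word]
--     #Convierte la segunda cadena de palabras separadas por coma en una lista de palabras.
--     sep_list = strArr[1].split(",")
--
--     rank_word = []
--
--     #Compara cuáles caracteres de la palabra que se desea buscar hacen match con el listado de palabras (separados por coma)
--     # y crea un ranking entre ellas
--     for word in sep_list:
--         counter = 0
--         for letter in word:
--             if letter in letters_of_word: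
--                 counter += 1
--             else:
--                 counter += 0
--         rank_word.append(counter)
--     if max(rank_word) < 1:
--         return -1
--     else:
--         highest_match_index = rank_word.index(max(rank_word))
--         highest_match_word =sep_list[highest_match_index]
--         dif =  len(highest_match_word) - len(letters_of_word)
--         return dif
-- ===== SOURCE B (Python) =====
-- def letter_match(strArr):
--     target = strArr[0]
--     best_count, best_len = -1, 0
--     cur_count, cur_len = 0, 0
--     for ch in strArr[1] + ",":
--         if ch == ",":
--             if best_count < cur_count:
--                 best_count, best_len = cur_count, cur_len
--             cur_count, cur_len = 0, 0
--         else: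
--             cur_len += 1
--             if ch in target:
--                 cur_count += 1
--     if best_count < 1:
--         return -1
--     return best_len - len(target)
-- ===== Notes on version B (the rewrite author's own statement) =====
-- stated objective: alternative
-- what changed: Replaces A's pipeline (split into a word list, build a parallel rank list, then max() and .index() and a re-index) by a single character-level scan of the raw string with a sentinel comma: no split and no word/rank lists, just current-word count/length flushed into the best pair at each separator (strict > keeps A's first-max tie-break).
import Mathlib
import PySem

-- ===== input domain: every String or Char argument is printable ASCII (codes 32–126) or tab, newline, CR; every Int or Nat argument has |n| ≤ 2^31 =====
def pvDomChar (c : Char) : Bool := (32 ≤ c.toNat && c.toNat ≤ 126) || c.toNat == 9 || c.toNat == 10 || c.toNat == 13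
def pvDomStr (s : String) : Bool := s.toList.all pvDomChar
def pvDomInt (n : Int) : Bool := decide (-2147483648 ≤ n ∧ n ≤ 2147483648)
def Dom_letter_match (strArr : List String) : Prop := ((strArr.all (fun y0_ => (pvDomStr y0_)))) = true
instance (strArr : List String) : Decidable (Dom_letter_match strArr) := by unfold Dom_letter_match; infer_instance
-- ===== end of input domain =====

-- B replaces A's split-then-rank-then-max/index pipeline by ONE character-level scan of the raw
-- string (sentinel comma at the end), flushing best count/length at each comma; alternative structure, same cost.


-- ===== PORT A =====
def letter_match (strArr : List String) : Int :=
  match PySem.List.pyGet? strArr 0, PySem.List.pyGet? strArr 1 with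
  | some my_word, some second =>
    let letters_of_word := my_word.toList
    match PySem.Str.split? second "," with
    | none => 0
    | some sep_list =>
      let rank_word := sep_list.map (fun word =>
        word.toList.foldl (fun counter letter =>
          if letter ∈ letters_of_word then counter + 1 else counter + 0) (0 : Int))
      match PySem.List.max? rank_word (fun y => y) with
      | none => 0
      | some m =>
        if m < 1 then -1
        else
          match PySem.List.index? rank_word m with
          | none => 0
          | some highest_match_index =>
            match PySem.List.pyGet? sep_list (highest_match_index : Int) with
            | none => 0
            | some highest_match_word =>
              PySem.Str.len highest_match_word - (letters_of_word.length : Int)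
  | _, _ => 0

-- ===== PORT B =====
-- one pass over the characters of strArr[1] (plus a sentinel ','): no split, no word list
def letter_match_alt (strArr : List String) : Int :=
  match PySem.List.pyGet? strArr 0 with
  | none => 0
  | some target =>
    match PySem.List.pyGet? strArr 1 with
    | none => 0
    | some second =>
      let st := (second.toList ++ [',']).foldl
        (fun (st : (Int × Int) × Int × Int) ch =>
          if ch = ',' then
            ((if st.1.1 < st.2.1 then (st.2.1, st.2.2) else st.1), 0, 0)
          else
            (st.1, st.2.1 + (if ch ∈ target.toList then 1 else 0), st.2.2 + 1))
        (((-1 : Int), (0 : Int)), (0 : Int), (0 : Int))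
      if st.1.1 < 1 then -1 else st.1.2 - PySem.Str.len target

-- ===== PRECONDITION & SPEC =====
-- Pre_ excludes exactly the inputs on which A raises IndexError: lists with fewer than two elements.
def Pre_letter_match (strArr : List String) : Prop := 2 ≤ strArr.length
instance (strArr : List String) : Decidable (Pre_letter_match strArr) := by unfold Pre_letter_match; infer_instance
def pvWitness_letter_match : List String := ["abc", "ab,xy,c"]
def Spec_letter_match (strArr : List String) (out : Int) : Prop := out = letter_match_alt strArr
instance (strArr : List String) (out : Int) : Decidable (Spec_letter_match strArr out) := by unfold Spec_letter_match; infer_instance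

-- ===== CLAIM (what is proved, stated in full; the proofs are below) =====
def Claim_equal_letter_match : Prop := ∀ (strArr : List String), Dom_letter_match strArr → Pre_letter_match strArr → Spec_letter_match strArr (letter_match strArr)

-- ===== LEMMAS AND PROOFS =====

-- proof-side model of splitting on one separator character
def pvSplit1 (c : Char) : List Char → List Char → List (List Char)
  | [], cur => [cur.reverse]
  | x :: rest, cur => if x = c then cur.reverse :: pvSplit1 c rest [] else pvSplit1 c rest (x :: cur)

theorem pv_split1_ne_nil (c : Char) : ∀ (l cur : List Char), pvSplit1 c l cur ≠ [] := by
  intro l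
  induction l with
  | nil => intro cur; simp [pvSplit1]
  | cons x rest ih =>
    intro cur
    by_cases h : x = c <;> simp [pvSplit1, h, ih]

-- PySem's splitOn on a single-char separator is pvSplit1
theorem pv_go_eq (c : Char) : ∀ (fuel : Nat) (l cur : List Char) (acc : List (List Char)),
    l.length < fuel →
    PySem.Chars.splitOn.go [c] fuel l cur acc = acc.reverse ++ pvSplit1 c l cur := by
  intro fuel
  induction fuel with
  | zero => intro l cur acc h; omega
  | succ n ih =>
    intro l cur acc h
    cases l with
    | nil => rw [PySem.Chars.splitOn.go] <;> simp [pvSplit1]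
    | cons x rest =>
      rw [PySem.Chars.splitOn.go]
      by_cases hx : x = c
      · subst hx
        have hpref : ([x].isPrefixOf (x :: rest)) = true := by simp [List.isPrefixOf]
        rw [if_pos hpref, show List.drop [x].length (x :: rest) = rest from rfl,
          ih rest [] (cur.reverse :: acc) (by simpa using Nat.lt_of_succ_lt_succ h)]
        simp [pvSplit1]
      · have hbeq : ([c].isPrefixOf (x :: rest)) = false := by
          simp [List.isPrefixOf]
          intro hc; exact absurd hc.symm hx
        simp only [hbeq, Bool.false_eq_true, if_false]
        rw [ih rest (x :: cur) acc (by simpa using Nat.lt_of_succ_lt_succ h)]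
        simp [pvSplit1, hx]

-- A's per-word counting loop is a countP
theorem pv_count_foldl (letters l : List Char) (a : Int) :
    l.foldl (fun counter letter => if letter ∈ letters then counter + 1 else counter + 0) a
      = a + (l.countP (fun ch => decide (ch ∈ letters)) : Nat) := by
  induction l generalizing a with
  | nil => simp
  | cons c t ih =>
    simp only [List.foldl_cons, List.countP_cons, ih]
    by_cases h : c ∈ letters
    · simp [h]; ring
    · simp [h]

-- B's character scan over l followed by the sentinel comma equals the word-level fold over pvSplit1
theorem pv_scan (T : List Char) : ∀ (l cur : List Char) (b : Int × Int),
    (l ++ [',']).foldl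
      (fun (st : (Int × Int) × Int × Int) ch =>
        if ch = ',' then
          ((if st.1.1 < st.2.1 then (st.2.1, st.2.2) else st.1), 0, 0)
        else
          (st.1, st.2.1 + (if ch ∈ T then 1 else 0), st.2.2 + 1))
      (b, ((cur.countP (fun x => decide (x ∈ T)) : Nat) : Int), ((cur.length : Nat) : Int))
    = ((pvSplit1 ',' l cur).foldl
        (fun (bb : Int × Int) w =>
          if bb.1 < ((w.countP (fun x => decide (x ∈ T)) : Nat) : Int)
          then (((w.countP (fun x => decide (x ∈ T)) : Nat) : Int), (w.length : Int))
          else bb) b,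
       0, 0) := by
  intro l
  induction l with
  | nil =>
    intro cur b
    simp [pvSplit1, List.countP_reverse]
  | cons x rest ih =>
    intro cur b
    by_cases hx : x = ','
    · subst hx
      rw [List.cons_append, List.foldl_cons, if_pos rfl]
      have h2 := ih [] (if b.1 < ((cur.countP (fun x => decide (x ∈ T)) : Nat) : Int)
          then (((cur.countP (fun x => decide (x ∈ T)) : Nat) : Int), ((cur.length : Nat) : Int))
          else b)
      simp only [List.countP_nil, Nat.cast_zero, List.length_nil] at h2
      rw [h2]
      simp [pvSplit1, List.countP_reverse]
    · rw [List.cons_append, List.foldl_cons, if_neg hx]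
      have e1 : ((cur.countP (fun x => decide (x ∈ T)) : Nat) : Int) + (if x ∈ T then 1 else 0)
          = (((x :: cur).countP (fun x => decide (x ∈ T)) : Nat) : Int) := by
        by_cases hm : x ∈ T <;> simp [hm]
      have e2 : ((cur.length : Nat) : Int) + 1 = (((x :: cur).length : Nat) : Int) := by
        push_cast [List.length_cons]; ring
      rw [e1, e2, ih (x :: cur) b]
      simp [pvSplit1, hx]

-- the word-level fold computes A's max and A's first argmax (with the word's length)
theorem pv_best_spec (f : List Char → Int) (hf : ∀ w, 0 ≤ f w) :
    ∀ ws : List (List Char), ws ≠ [] →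
    ∃ (i : Nat) (h : i < ws.length),
      ws.foldl (fun (b : Int × Int) w => if b.1 < f w then (f w, (w.length : Int)) else b)
          ((-1 : Int), (0 : Int)) = (f ws[i], (ws[i].length : Int)) ∧
      PySem.List.max? (ws.map f) (fun y => y) = some (f ws[i]) ∧
      PySem.List.index? (ws.map f) (f ws[i]) = some i := by
  intro ws
  induction ws using List.reverseRecOn with
  | nil => intro h; exact absurd rfl h
  | append_singleton ws w ih =>
    intro _
    by_cases hws : ws = []
    · subst hws
      refine ⟨0, by simp, ?_, ?_, ?_⟩
      · simp [show (-1 : Int) < f w from lt_of_lt_of_le (by norm_num) (hf w)]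
      · simp [PySem.List.max?_id_cons]
      · simp
    · obtain ⟨i, hi, hfold, hmax, hidx⟩ := ih hws
      have hmem : f ws[i] ∈ ws.map f := List.mem_map.mpr ⟨ws[i], List.getElem_mem hi, rfl⟩
      by_cases hc : f ws[i] < f w
      · refine ⟨ws.length, by simp, ?_, ?_, ?_⟩
        · simp [List.foldl_append, hfold, hc,
            List.getElem_concat_length (l := ws) (a := w) rfl]
        · obtain ⟨r0, rt, hr⟩ := List.exists_cons_of_ne_nil
            (show ws.map f ≠ [] by simpa using hws)
          have hcast : (ws ++ [w]).map f = r0 :: (rt ++ [f w]) := by simp [hr]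
          rw [hcast, PySem.List.max?_id_cons, List.foldl_append]
          have hm0 : List.foldl max r0 rt = f ws[i] := by
            have := hmax
            rw [hr, PySem.List.max?_id_cons] at this
            exact Option.some.inj this
          rw [hm0, List.getElem_concat_length (l := ws) (a := w) rfl]
          simp [max_eq_right hc.le]
        · have hnot : f w ∉ ws.map f := by
            intro hmem'
            have := PySem.List.max?_isMax hmax (f w) hmem'
            simp at this
            omega
          have : (ws ++ [w]).map f = ws.map f ++ [f w] := by simp
          rw [this, List.getElem_concat_length (l := ws) (a := w) rfl,
            PySem.List.index?_append_singleton_self _ _ hnot]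
          simp
      · refine ⟨i, by simp; omega, ?_, ?_, ?_⟩
        · simp [List.foldl_append, hfold, hc, List.getElem_append_left hi]
        · obtain ⟨r0, rt, hr⟩ := List.exists_cons_of_ne_nil
            (show ws.map f ≠ [] by simpa using hws)
          have hcast : (ws ++ [w]).map f = r0 :: (rt ++ [f w]) := by simp [hr]
          rw [hcast, PySem.List.max?_id_cons, List.foldl_append]
          have hm : List.foldl max r0 rt = f ws[i] := by
            have := hmax
            rw [hr, PySem.List.max?_id_cons] at this
            exact Option.some.inj this
          rw [hm, List.getElem_append_left hi]
          simp
          omega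
        · have : (ws ++ [w]).map f = ws.map f ++ [f w] := by simp
          rw [this, List.getElem_append_left hi,
            PySem.List.index?_append_of_mem _ hmem, hidx]

-- ===== VERDICT (by name: the statement is the Claim_ definition above) =====
theorem letter_match_spec : Claim_equal_letter_match := by
  intro strArr _ hpre
  unfold Spec_letter_match letter_match letter_match_alt
  match strArr, hpre with
  | a :: b :: rest, _ =>
    have h0 : PySem.List.pyGet? (a :: b :: rest) (0 : Int) = some a := by
      simp [PySem.List.pyGet?, PySem.List.pyIdx?,
        show (0 : Int) ≤ (rest.length : Int) + 1 by positivity]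
    have h1 : PySem.List.pyGet? (a :: b :: rest) (1 : Int) = some b := by
      simp [PySem.List.pyGet?, PySem.List.pyIdx?]
    have hcomma : (",".toList) = [','] := by decide
    -- A's split is pvSplit1 on the characters
    have hsp : PySem.Str.split? b "," = some ((pvSplit1 ',' b.toList []).map String.ofList) := by
      unfold PySem.Str.split? PySem.Chars.split? PySem.Chars.splitOn
      rw [hcomma, pv_go_eq ',' (b.toList.length + 1) b.toList [] [] (Nat.lt_succ_self _)]
      simp
    obtain ⟨i, hi, hfold, hmax, hidx⟩ := pv_best_spec
      (fun w => ((w.countP (fun ch => decide (ch ∈ a.toList)) : Nat) : Int))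
      (fun w => Int.natCast_nonneg _) (pvSplit1 ',' b.toList []) (pv_split1_ne_nil ',' _ _)
    -- A's rank list over the split words
    have hrank : ((pvSplit1 ',' b.toList []).map String.ofList).map (fun word =>
        word.toList.foldl (fun counter letter =>
          if letter ∈ a.toList then counter + 1 else counter + 0) (0 : Int))
        = (pvSplit1 ',' b.toList []).map
            (fun w => ((w.countP (fun ch => decide (ch ∈ a.toList)) : Nat) : Int)) := by
      rw [List.map_map]
      apply List.map_congr_left
      intro w _
      simp only [Function.comp, String.toList_ofList, pv_count_foldl, zero_add]
    -- B's character scan reduced to the word-level fold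
    have hscan := pv_scan a.toList b.toList [] ((-1 : Int), (0 : Int))
    simp only [List.countP_nil, Nat.cast_zero, List.length_nil] at hscan
    have hwfold : (pvSplit1 ',' b.toList []).foldl
        (fun (bb : Int × Int) w =>
          if bb.1 < ((w.countP (fun x => decide (x ∈ a.toList)) : Nat) : Int)
          then (((w.countP (fun x => decide (x ∈ a.toList)) : Nat) : Int), (w.length : Int))
          else bb) ((-1 : Int), (0 : Int))
        = ((((pvSplit1 ',' b.toList [])[i].countP (fun ch => decide (ch ∈ a.toList)) : Nat) : Int),
           (((pvSplit1 ',' b.toList [])[i].length : Nat) : Int)) := hfold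
    have hget : PySem.List.pyGet? ((pvSplit1 ',' b.toList []).map String.ofList) (i : Int)
        = some (String.ofList (pvSplit1 ',' b.toList [])[i]) := by
      rw [PySem.List.pyGet?_natCast]
      simp [List.getElem?_map, List.getElem?_eq_getElem hi]
    simp only [h0, h1, hsp, hrank, hmax, hidx, hscan, hwfold]
    by_cases hm : ((((pvSplit1 ',' b.toList [])[i]).countP
        (fun ch => decide (ch ∈ a.toList)) : Nat) : Int) < 1
    · simp [hm]
    · simp [hm, hget, PySem.Str.len, String.toList_ofList]
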